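-- pv_equiv track=rewrite | github.com/CodingEZ/Scrabble-AI | humanChecker.py | getSideCombo
-- ===== SOURCE A (Python) =====
-- def getSideCombo(isRowCombo, spot, occupied):
--     ''' Get the spots that correspond to the side combo in order '''
--     locations = [spot]
--     locator = spot
--     if isRowCombo:
--         while (locator + 15) in occupied:
--             locator += 15
--             locations.append(locator)
--         locator = spot
--         while (locator - 15) in occupied:
--             locator -= 15
--             locations.append(locator)
--     else:
--         while ((locator + 1) in occupied) and (locator%15 != 14):
--             locator += 1
--             locations.append(locator)
--         locator = spot
--         while ((locator - 1) in occupied) and (locator%15 != 0):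
--             locator -= 1
--             locations.append(locator)
--     return sorted(locations)
-- ===== SOURCE B (Python) =====
-- def getSideCombo(isRowCombo, spot, occupied):
--     ''' Get the spots that correspond to the side combo in order '''
--     if isRowCombo:
--         step = 15
--         idxs = {(c - spot) // 15 for c in occupied if (c - spot) % 15 == 0}
--     else:
--         step = 1
--         idxs = {c - spot for c in occupied if c // 15 == spot // 15}
--     idxs.add(0)
--     vals = sorted(idxs)
--     lo = hi = vals[0]
--     for v in vals[1:]:
--         if v == hi + 1:
--             hi = v
--         elif lo <= 0 <= hi:
--             break
--         else:
--             lo = hi = v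
--     return [spot + step * k for k in range(lo, hi + 1)]
-- ===== Notes on version B (the rewrite author's own statement) =====
-- stated objective: alternative
-- what changed: B replaces A's bidirectional step-by-step membership walk by projecting occupied onto the spot's row/column as offsets, sorting the distinct offsets once, and extracting the contiguous run containing offset 0 with a single scan over runs (no per-step membership tests, no final sort of the result).
import Mathlib
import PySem

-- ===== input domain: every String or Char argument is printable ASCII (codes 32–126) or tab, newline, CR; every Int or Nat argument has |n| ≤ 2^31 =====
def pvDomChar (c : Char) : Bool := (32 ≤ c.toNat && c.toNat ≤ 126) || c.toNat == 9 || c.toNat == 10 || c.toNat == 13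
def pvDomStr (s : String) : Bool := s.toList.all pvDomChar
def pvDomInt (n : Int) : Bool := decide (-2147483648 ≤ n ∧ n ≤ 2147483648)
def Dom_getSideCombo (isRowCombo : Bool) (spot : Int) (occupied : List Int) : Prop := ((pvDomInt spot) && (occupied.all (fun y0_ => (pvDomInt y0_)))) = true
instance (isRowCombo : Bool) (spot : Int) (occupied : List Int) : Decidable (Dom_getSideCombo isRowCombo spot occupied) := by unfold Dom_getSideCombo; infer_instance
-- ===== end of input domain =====

-- B replaces the bidirectional step-by-step membership walk by: project occupied onto the
-- spot's line as offsets, sort the distinct offsets once, and find the contiguous run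
-- containing offset 0 by a single scan over runs (objective: alternative decomposition).

-- ===== PORT A =====
-- fuel-bounded transcription of A's while loops (fuel = len(occupied) always suffices:
-- each successful step visits a fresh distinct member of occupied)
def pvAWalk (g : Int → Bool) (t : Int) : Nat → Int → List Int → List Int
  | 0, _, locs => locs
  | f+1, loc, locs => if g loc then pvAWalk g t f (loc + t) (locs ++ [loc + t]) else locs

def getSideCombo (isRowCombo : Bool) (spot : Int) (occupied : List Int) : List Int :=
  let fuel := occupied.length
  let locations :=
    if isRowCombo then
      pvAWalk (fun l => occupied.contains (l - 15)) (-15) fuel spot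
        (pvAWalk (fun l => occupied.contains (l + 15)) 15 fuel spot [spot])
    else
      pvAWalk (fun l => occupied.contains (l - 1) && decide (PySem.Int.mod l 15 ≠ 0)) (-1) fuel spot
        (pvAWalk (fun l => occupied.contains (l + 1) && decide (PySem.Int.mod l 15 ≠ 14)) 1 fuel spot [spot])
  PySem.List.sorted locations (fun x => x)

-- ===== PORT B =====
-- scan of the sorted distinct offsets: advance the current run [lo,hi]; at a gap stop if
-- the run contains 0, else start a new run (transcribes Source B's for-loop with break)
def pvScan : List Int → Int → Int → Int × Int
  | [], lo, hi => (lo, hi)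
  | v :: rest, lo, hi =>
    if v = hi + 1 then pvScan rest lo v
    else if lo ≤ 0 ∧ 0 ≤ hi then (lo, hi)
    else pvScan rest v v

def getSideCombo_alt (isRowCombo : Bool) (spot : Int) (occupied : List Int) : List Int :=
  let step : Int := if isRowCombo then 15 else 1
  let idxs : PySem.Set Int :=
    if isRowCombo then
      PySem.Set.ofList ((occupied.filter (fun c => PySem.Int.mod (c - spot) 15 == 0)).map
        (fun c => PySem.Int.floordiv (c - spot) 15))
    else
      PySem.Set.ofList ((occupied.filter (fun c => PySem.Int.floordiv c 15 == PySem.Int.floordiv spot 15)).map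
        (fun c => c - spot))
  let vals := PySem.List.sorted (PySem.Set.add idxs 0) (fun x => x)
  match vals with
  | [] => []   -- unreachable (0 is always among the offsets); totality guard only
  | v0 :: rest =>
    let p := pvScan rest v0 v0
    (PySem.List.pyRange p.1 (p.2 + 1) 1).map (fun k => spot + step * k)

-- ===== PRECONDITION & SPEC =====
def Spec_getSideCombo (isRowCombo : Bool) (spot : Int) (occupied : List Int) (out : List Int) : Prop := out = getSideCombo_alt isRowCombo spot occupied
instance (isRowCombo : Bool) (spot : Int) (occupied : List Int) (out : List Int) : Decidable (Spec_getSideCombo isRowCombo spot occupied out) := by unfold Spec_getSideCombo; infer_instance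

-- ===== CLAIM (what is proved, stated in full; the proofs are below) =====
def Claim_equal_getSideCombo : Prop := ∀ (isRowCombo : Bool) (spot : Int) (occupied : List Int), Dom_getSideCombo isRowCombo spot occupied → Spec_getSideCombo isRowCombo spot occupied (getSideCombo isRowCombo spot occupied)

-- ===== LEMMAS AND PROOFS =====

-- proof-side abstraction of a directional walk keeping only the last location
def pvBWalk (g : Int → Bool) (t : Int) : Nat → Int → Int
  | 0, loc => loc
  | f+1, loc => if g loc then pvBWalk g t f (loc + t) else loc

-- the list A's directional loop appends
def pvSeq (g : Int → Bool) (t : Int) : Nat → Int → List Int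
  | 0, _ => []
  | f+1, loc => if g loc then (loc + t) :: pvSeq g t f (loc + t) else []

lemma pvAWalk_eq (g : Int → Bool) (t : Int) : ∀ (f : Nat) (loc : Int) (acc : List Int),
    pvAWalk g t f loc acc = acc ++ pvSeq g t f loc := by
  intro f
  induction f with
  | zero => intro loc acc; simp [pvAWalk, pvSeq]
  | succ f ih =>
    intro loc acc
    by_cases h : g loc
    · simp [pvAWalk, pvSeq, h, ih]
    · simp [pvAWalk, pvSeq, h]

lemma pvWalk_char (g : Int → Bool) (t : Int) : ∀ (f : Nat) (loc : Int),
    ∃ n : Nat, pvBWalk g t f loc = loc + t * n ∧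
      pvSeq g t f loc = (List.range n).map (fun (k : Nat) => loc + t * ((k : Int) + 1)) := by
  intro f
  induction f with
  | zero => intro loc; exact ⟨0, by simp [pvBWalk], by simp [pvSeq]⟩
  | succ f ih =>
    intro loc
    by_cases h : g loc
    · obtain ⟨n, h1, h2⟩ := ih (loc + t)
      refine ⟨n + 1, ?_, ?_⟩
      · simp only [pvBWalk, h, if_pos, h1]; push_cast; ring
      · simp only [pvSeq, h, if_pos, h2, List.range_succ_eq_map, List.map_map, List.map_cons]
        congr 1
        · ring
        · apply List.map_congr_left; intro k _; simp [Function.comp]; ring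
    · exact ⟨0, by simp [pvBWalk, h], by simp [pvSeq, h]⟩

lemma pvRangeSplit (f : Nat → Int) (m n : Nat) :
    (List.range (m + (n+1))).map f
      = (List.range m).map f ++ f m :: (List.range n).map (fun k => f (m + (k+1))) := by
  rw [List.range_add, List.map_append, List.range_succ_eq_map]
  simp [List.map_map, Function.comp, Nat.succ_eq_add_one]

lemma pvRevPerm (s : Int) : ∀ (m : Nat) (spot : Int),
    ((List.range m).map (fun (k : Nat) => spot + (-s) * ((k : Int) + 1))).Perm
      ((List.range m).map (fun (j : Nat) => spot + (-s) * (m : Int) + s * (j : Int))) := by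
  intro m
  induction m with
  | zero => intro spot; simp
  | succ m ih =>
    intro spot
    have hLHS : (List.range (m+1)).map (fun (k : Nat) => spot + (-s) * ((k : Int) + 1))
        = ((List.range m).map (fun (k : Nat) => spot + (-s) * ((k : Int) + 1)))
            ++ [spot + (-s) * ((m : Int) + 1)] := by
      rw [List.range_succ]; simp
    have hRHS : (List.range (m+1)).map (fun (j : Nat) => spot + (-s) * (((m+1 : Nat)) : Int) + s * (j : Int))
        = (spot + (-s) * ((m : Int) + 1))
            :: (List.range m).map (fun (j : Nat) => spot + (-s) * (m : Int) + s * (j : Int)) := by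
      rw [List.range_succ_eq_map, List.map_cons, List.map_map]
      congr 1
      · push_cast; ring
      · apply List.map_congr_left; intro k _; simp only [Function.comp]; push_cast; ring
    rw [hLHS, hRHS]
    exact (List.perm_append_singleton _ _).trans ((ih spot).cons _)

-- A's sorted result as an arithmetic range between the two walk fixpoints
lemma pvMaster (gu gd : Int → Bool) (s : Int) (hs : 0 < s) (fuel : Nat) (spot : Int) :
    PySem.List.sorted (pvAWalk gd (-s) fuel spot (pvAWalk gu s fuel spot [spot])) (fun x => x)
      = (PySem.List.pyRange 0 (PySem.Int.floordiv (pvBWalk gu s fuel spot - pvBWalk gd (-s) fuel spot) s + 1) 1).map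
          (fun k => pvBWalk gd (-s) fuel spot + s * k) := by
  obtain ⟨n, hn1, hn2⟩ := pvWalk_char gu s fuel spot
  obtain ⟨m, hm1, hm2⟩ := pvWalk_char gd (-s) fuel spot
  have hdiff : pvBWalk gu s fuel spot - pvBWalk gd (-s) fuel spot = s * ((n : Int) + (m : Int)) := by
    rw [hn1, hm1]; ring
  have hfd : PySem.Int.floordiv (s * ((n : Int) + (m : Int))) s = (n : Int) + (m : Int) := by
    simp [PySem.Int.floordiv]
    exact Int.mul_fdiv_cancel_left _ (ne_of_gt hs)
  have htn : ((n : Int) + (m : Int) + 1 - 0).toNat = m + (n + 1) := by omega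
  have hrhs : (PySem.List.pyRange 0 (PySem.Int.floordiv (pvBWalk gu s fuel spot - pvBWalk gd (-s) fuel spot) s + 1) 1).map
          (fun k => pvBWalk gd (-s) fuel spot + s * k)
      = (List.range (m + (n+1))).map (fun (j : Nat) => spot + (-s) * (m : Int) + s * (j : Int)) := by
    rw [hdiff, hfd, hm1, PySem.List.pyRange_one, htn, List.map_map]
    apply List.map_congr_left; intro k _; simp [Function.comp]
  rw [hrhs, pvAWalk_eq, pvAWalk_eq, hn2, hm2]
  apply PySem.List.sorted_eq_of_perm_of_pairwise_lt
  · rw [pvRangeSplit]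
    have hmid : spot + (-s) * (m : Int) + s * (m : Int) = spot := by ring
    have hup : (List.range n).map (fun (k : Nat) => spot + (-s) * (m : Int) + s * (((m + (k+1) : Nat)) : Int))
        = (List.range n).map (fun (k : Nat) => spot + s * ((k : Int) + 1)) := by
      apply List.map_congr_left; intro k _; push_cast; ring
    rw [hmid, hup]
    refine (List.perm_append_comm).trans ?_
    show ((spot :: (List.range n).map (fun (k : Nat) => spot + s * ((k : Int) + 1)))
        ++ (List.range m).map (fun (j : Nat) => spot + (-s) * (m : Int) + s * (j : Int))).Perm _
    exact (((pvRevPerm s m spot).symm.append_left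
      ((List.range n).map (fun (k : Nat) => spot + s * ((k : Int) + 1)))).cons spot)
  · refine List.Pairwise.map (f := fun (j : Nat) => spot + (-s) * (m : Int) + s * (j : Int))
      (fun a b hab => ?_) List.pairwise_lt_range
    have h1 : (a : Int) < (b : Int) := by exact_mod_cast hab
    have h2 : s * (a : Int) < s * (b : Int) := mul_lt_mul_of_pos_left h1 hs
    simp only []
    linarith

-- fuel-bounded walk: guard sequence characterization
lemma pvWalk_guard (g : Int → Bool) (t : Int) : ∀ (f : Nat) (start : Int),
    ∃ n : Nat, n ≤ f ∧ pvBWalk g t f start = start + t * n ∧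
      (∀ j : Nat, j < n → g (start + t * j) = true) ∧
      (n < f → g (start + t * n) = false) := by
  intro f
  induction f with
  | zero => intro start; exact ⟨0, le_refl 0, by simp [pvBWalk], by omega, by omega⟩
  | succ f ih =>
    intro start
    by_cases h : g start
    · obtain ⟨n, hle, h1, h2, h3⟩ := ih (start + t)
      refine ⟨n + 1, by omega, ?_, ?_, ?_⟩
      · simp only [pvBWalk, h, if_pos, h1]; push_cast; ring
      · intro j hj
        cases j with
        | zero => simpa using h
        | succ j =>
          have := h2 j (by omega)
          have harg : start + t * ((j : Nat) + 1 : Nat) = start + t + t * j := by push_cast; ring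
          rw [harg]; exact this
      · intro hlt
        have := h3 (by omega)
        have harg : start + t * ((n + 1 : Nat) : Int) = start + t + t * n := by push_cast; ring
        rw [harg]; exact this
    · exact ⟨0, by omega, by simp [pvBWalk, h], by omega,
        fun _ => by simpa using h⟩

-- with fuel = len(occupied) and a guard that forces a fresh member of occupied at each
-- step, the walk always reaches a location where the guard fails
lemma pvWalk_full (occ : List Int) (g : Int → Bool) (t : Int) (ht : t ≠ 0)
    (hg : ∀ l : Int, g l = true → (l + t) ∈ occ) (spot : Int) :
    ∃ n : Nat, pvBWalk g t occ.length spot = spot + t * n ∧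
      (∀ j : Nat, j < n → g (spot + t * j) = true) ∧
      g (spot + t * (n : Int)) = false := by
  obtain ⟨n, hle, h1, h2, h3⟩ := pvWalk_guard g t occ.length spot
  refine ⟨n, h1, h2, ?_⟩
  by_cases hn : n < occ.length
  · exact h3 hn
  · -- n = occ.length; a further guard success would force occ.length + 1 distinct members
    have hne : n = occ.length := by omega
    by_contra hgt
    have hgt' : g (spot + t * (n : Int)) = true := by
      cases hh : g (spot + t * (n : Int)) with
      | false => exact absurd hh hgt
      | true => rfl
    -- all of spot + t*(j+1), j ≤ n, are members of occ
    have hmem : ∀ j : Nat, j ≤ n → spot + t * ((j : Int) + 1) ∈ occ := by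
      intro j hj
      rcases Nat.lt_or_ge j n with hlt | hge
      · have := hg _ (h2 j hlt)
        have harg : spot + t * (j : Int) + t = spot + t * ((j : Int) + 1) := by ring
        rwa [harg] at this
      · have hj' : j = n := by omega
        subst hj'
        have := hg _ hgt'
        have harg : spot + t * (j : Int) + t = spot + t * ((j : Int) + 1) := by ring
        rwa [harg] at this
    set L : List Int := (List.range (n+1)).map (fun j : Nat => spot + t * ((j : Int) + 1)) with hL
    have hnd : L.Nodup := by
      refine List.Nodup.map ?_ (List.nodup_range)
      intro a b hab
      simp only at hab
      have : t * ((a : Int) + 1) = t * ((b : Int) + 1) := by linarith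
      have := mul_left_cancel₀ ht this
      omega
    have hsub : L ⊆ occ := by
      intro x hx
      rw [hL, List.mem_map] at hx
      obtain ⟨j, hj, rfl⟩ := hx
      exact hmem j (by simpa [List.mem_range] using Nat.lt_succ_iff.mp (List.mem_range.mp hj))
    have hlen : L.length ≤ occ.length := (List.subperm_of_subset hnd hsub).length_le
    have : L.length = n + 1 := by simp [hL]
    omega

-- the scan finds exactly the maximal contiguous run of vals containing 0
lemma pvScan_spec (vals : List Int) :
    ∀ (rest : List Int) (lo hi : Int),
      rest.Pairwise (· < ·) →
      (∀ w : Int, hi < w → (w ∈ vals ↔ w ∈ rest)) →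
      (∀ w ∈ rest, hi < w) →
      (∀ k : Int, lo ≤ k → k ≤ hi → k ∈ vals) →
      (lo - 1) ∉ vals →
      lo ≤ hi → lo ≤ 0 → (0:Int) ∈ vals →
      (pvScan rest lo hi).1 ≤ 0 ∧ 0 ≤ (pvScan rest lo hi).2 ∧
      (∀ k : Int, (pvScan rest lo hi).1 ≤ k → k ≤ (pvScan rest lo hi).2 → k ∈ vals) ∧
      ((pvScan rest lo hi).1 - 1) ∉ vals ∧ ((pvScan rest lo hi).2 + 1) ∉ vals := by
  intro rest
  induction rest with
  | nil =>
    intro lo hi _ h2 _ h4 h5 h6 h7 h8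
    have hhi : (0:Int) ≤ hi := by
      by_contra hneg
      have := (h2 0 (by omega)).mp h8
      simp at this
    refine ⟨h7, hhi, h4, h5, ?_⟩
    intro hmem
    have := (h2 (hi+1) (by omega)).mp hmem
    simp at this
  | cons v rest' ih =>
    intro lo hi h1 h2 h3 h4 h5 h6 h7 h8
    have hvhi : hi < v := h3 v (List.mem_cons_self ..)
    have h1' : rest'.Pairwise (· < ·) := (List.pairwise_cons.mp h1).2
    have hvlt : ∀ w ∈ rest', v < w := (List.pairwise_cons.mp h1).1
    have hvmem : v ∈ vals := (h2 v hvhi).mpr (List.mem_cons_self ..)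
    by_cases hv : v = hi + 1
    · subst hv
      have res : pvScan ((hi+1) :: rest') lo hi = pvScan rest' lo (hi+1) := by
        simp [pvScan]
      rw [res]
      refine ih lo (hi+1) h1' ?_ ?_ ?_ h5 (by omega) h7 h8
      · intro w hw
        constructor
        · intro hwv
          have := (h2 w (by omega)).mp hwv
          rcases List.mem_cons.mp this with h | h
          · omega
          · exact h
        · intro hwr
          exact (h2 w (by omega)).mpr (List.mem_cons.mpr (Or.inr hwr))
      · intro w hw; exact hvlt w hw
      · intro k hk1 hk2
        rcases Int.lt_or_le k (hi+1) with h | h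
        · exact h4 k hk1 (by omega)
        · have : k = hi + 1 := by omega
          subst this; exact hvmem
    · have hgap : hi + 1 < v := by omega
      by_cases h0 : lo ≤ 0 ∧ 0 ≤ hi
      · have res : pvScan (v :: rest') lo hi = (lo, hi) := by
          simp [pvScan, hv, h0.1, h0.2]
        rw [res]
        refine ⟨h0.1, h0.2, h4, h5, ?_⟩
        intro hmem
        have := (h2 (hi+1) (by omega)).mp hmem
        rcases List.mem_cons.mp this with h | h
        · omega
        · have := hvlt _ h; omega
      · have hhineg : hi < 0 := by
          rcases not_and_or.mp h0 with h | h
          · omega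
          · omega
        have hvle : v ≤ 0 := by
          have := (h2 0 (by omega)).mp h8
          rcases List.mem_cons.mp this with h | h
          · omega
          · have := hvlt _ h; omega
        have res : pvScan (v :: rest') lo hi = pvScan rest' v v := by
          have : ¬ (lo ≤ 0 ∧ 0 ≤ hi) := h0
          simp [pvScan, hv, this]
        rw [res]
        refine ih v v h1' ?_ hvlt ?_ ?_ (le_refl v) hvle h8
        · intro w hw
          constructor
          · intro hwv
            have := (h2 w (by omega)).mp hwv
            rcases List.mem_cons.mp this with h | h
            · omega
            · exact h
          · intro hwr
            exact (h2 w (by omega)).mpr (List.mem_cons.mpr (Or.inr hwr))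
        · intro k hk1 hk2
          have : k = v := by omega
          subst this; exact hvmem
        · intro hmem
          have := (h2 (v-1) (by omega)).mp hmem
          rcases List.mem_cons.mp this with h | h
          · omega
          · have := hvlt _ h; omega

-- the run [lo,hi] containing 0 is determined by the membership predicate
lemma pvRunUnique (P : Int → Prop) (lo hi : Int) (n m : Nat)
    (h1 : lo ≤ 0) (h2 : 0 ≤ hi) (h3 : ∀ k : Int, lo ≤ k → k ≤ hi → P k)
    (h4 : ¬ P (lo-1)) (h5 : ¬ P (hi+1))
    (hup : ∀ j : Int, 1 ≤ j → j ≤ (n : Int) → P j) (hnup : ¬ P ((n : Int)+1))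
    (hdn : ∀ j : Int, 1 ≤ j → j ≤ (m : Int) → P (-j)) (hndn : ¬ P (-(m : Int)-1)) :
    lo = -(m : Int) ∧ hi = (n : Int) := by
  constructor
  · rcases lt_trichotomy lo (-(m:Int)) with h | h | h
    · exact absurd (h3 (-(m:Int)-1) (by omega) (by omega)) hndn
    · exact h
    · have hmem := hdn (1 - lo) (by omega) (by omega)
      have h' : -(1 - lo) = lo - 1 := by ring
      rw [h'] at hmem
      exact absurd hmem h4
  · rcases lt_trichotomy hi (n:Int) with h | h | h
    · exact absurd (hup (hi+1) (by omega) (by omega)) h5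
    · exact h
    · exact absurd (h3 ((n:Int)+1) (by omega) (by omega)) hnup

lemma pvFd15 (a : Int) : PySem.Int.floordiv a 15 = a / 15 :=
  PySem.Int.floordiv_eq_ediv_of_pos (by norm_num)

lemma pvFm15 (a : Int) : PySem.Int.mod a 15 = a % 15 :=
  PySem.Int.mod_eq_emod_of_pos (by norm_num)

-- membership in the projected offset list, row case
lemma pvMemRow (spot : Int) (occupied : List Int) (j : Int) :
    (j ∈ (occupied.filter (fun c => PySem.Int.mod (c - spot) 15 == 0)).map
        (fun c => PySem.Int.floordiv (c - spot) 15))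
      ↔ (spot + 15 * j) ∈ occupied := by
  simp only [List.mem_map, List.mem_filter, pvFd15, pvFm15, beq_iff_eq]
  constructor
  · rintro ⟨c, ⟨hc, hmod⟩, hdiv⟩
    have : c = spot + 15 * j := by omega
    rwa [← this]
  · intro h
    exact ⟨spot + 15 * j, ⟨h, by omega⟩, by omega⟩

-- membership in the projected offset list, column case
lemma pvMemCol (spot : Int) (occupied : List Int) (j : Int) :
    (j ∈ (occupied.filter (fun c => PySem.Int.floordiv c 15 == PySem.Int.floordiv spot 15)).map
        (fun c => c - spot))
      ↔ ((spot + j) ∈ occupied ∧ (spot + j) / 15 = spot / 15) := by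
  simp only [List.mem_map, List.mem_filter, pvFd15, beq_iff_eq]
  constructor
  · rintro ⟨c, ⟨hc, hdiv⟩, hcj⟩
    have : c = spot + j := by omega
    subst this; exact ⟨hc, hdiv⟩
  · rintro ⟨h1, h2⟩
    exact ⟨spot + j, ⟨h1, h2⟩, by ring⟩

-- strict sortedness of the sorted distinct offsets
lemma pvValsSorted (l : List Int) :
    (PySem.List.sorted (PySem.Set.add (PySem.Set.ofList l) 0) (fun x : Int => x)).Pairwise (· < ·) := by
  have hnd : (PySem.Set.add (PySem.Set.ofList l) 0).Nodup :=
    PySem.Set.nodup_add _ _ (PySem.Set.nodup_ofList l)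
  have hperm : (PySem.List.sorted (PySem.Set.add (PySem.Set.ofList l) 0) (fun x : Int => x)).Perm
      (PySem.Set.add (PySem.Set.ofList l) 0) := PySem.List.sorted_perm _ _ _
  have hnd2 : (PySem.List.sorted (PySem.Set.add (PySem.Set.ofList l) 0) (fun x : Int => x)).Nodup :=
    hperm.nodup_iff.mpr hnd
  have hle : (PySem.List.sorted (PySem.Set.add (PySem.Set.ofList l) 0) (fun x : Int => x)).Pairwise
      (fun a b : Int => a ≤ b) := PySem.List.sorted_pairwise _ _
  exact (hle.and hnd2).imp (fun hab => lt_of_le_of_ne hab.1 hab.2)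

lemma pvMemVals (l : List Int) (w : Int) :
    w ∈ PySem.List.sorted (PySem.Set.add (PySem.Set.ofList l) 0) (fun x : Int => x)
      ↔ (w ∈ l ∨ w = 0) := by
  rw [PySem.List.mem_sorted, PySem.Set.mem_add, PySem.Set.mem_ofList]

-- the scan over the sorted offsets returns the run determined by walk counts n (up) and m (down)
lemma pvScanRun (l : List Int) (n m : Nat)
    (hup : ∀ j : Int, 1 ≤ j → j ≤ (n : Int) → j ∈ l) (hnup : ((n : Int)+1) ∉ l)
    (hdn : ∀ j : Int, 1 ≤ j → j ≤ (m : Int) → (-j) ∈ l) (hndn : (-(m : Int)-1) ∉ l) :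
    ∃ v0 rest, PySem.List.sorted (PySem.Set.add (PySem.Set.ofList l) 0) (fun x : Int => x) = v0 :: rest ∧
      pvScan rest v0 v0 = (-(m : Int), (n : Int)) := by
  set vals := PySem.List.sorted (PySem.Set.add (PySem.Set.ofList l) 0) (fun x : Int => x) with hvals
  have h0 : (0:Int) ∈ vals := (pvMemVals l 0).mpr (Or.inr rfl)
  have hsort : vals.Pairwise (· < ·) := pvValsSorted l
  obtain ⟨v0, rest, hcons⟩ : ∃ v0 rest, vals = v0 :: rest := by
    cases hv : vals with
    | nil => rw [hv] at h0; simp at h0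
    | cons a t => exact ⟨a, t, rfl⟩
  refine ⟨v0, rest, hcons, ?_⟩
  have hsort' : (v0 :: rest).Pairwise (· < ·) := hcons ▸ hsort
  have hrp : rest.Pairwise (· < ·) := (List.pairwise_cons.mp hsort').2
  have hv0lt : ∀ w ∈ rest, v0 < w := (List.pairwise_cons.mp hsort').1
  have hv0min : ∀ w ∈ vals, v0 ≤ w := by
    intro w hw
    rw [hcons] at hw
    rcases List.mem_cons.mp hw with h | h
    · omega
    · have := hv0lt w h; omega
  have hv0le : v0 ≤ 0 := hv0min 0 h0
  have hv0mem : v0 ∈ vals := by rw [hcons]; exact List.mem_cons_self ..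
  have hspec := pvScan_spec vals rest v0 v0 hrp
    (by
      intro w hw
      constructor
      · intro hwv
        rw [hcons] at hwv
        rcases List.mem_cons.mp hwv with h | h
        · omega
        · exact h
      · intro hwr
        rw [hcons]; exact List.mem_cons.mpr (Or.inr hwr))
    hv0lt
    (by intro k hk1 hk2
        have : k = v0 := by omega
        subst this; exact hv0mem)
    (by intro hmem; have := hv0min _ hmem; omega)
    (le_refl v0) hv0le h0
  obtain ⟨s1, s2, s3, s4, s5⟩ := hspec
  have hP : ∀ w : Int, (w ∈ vals ↔ (w ∈ l ∨ w = 0)) := pvMemVals l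
  have hu := pvRunUnique (fun w => w ∈ vals) (pvScan rest v0 v0).1 (pvScan rest v0 v0).2 n m
    s1 s2 s3 s4 s5
    (by intro j hj1 hj2; exact (hP j).mpr (Or.inl (hup j hj1 hj2)))
    (by intro hmem
        rcases (hP _).mp hmem with h | h
        · exact hnup h
        · omega)
    (by intro j hj1 hj2; exact (hP (-j)).mpr (Or.inl (hdn j hj1 hj2)))
    (by intro hmem
        rcases (hP _).mp hmem with h | h
        · exact hndn h
        · omega)
  exact Prod.ext_iff.mpr ⟨hu.1, hu.2⟩

-- final range-map equality
lemma pvRangeMaps (spot s : Int) (hs : 0 < s) (n m : Nat) :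
    (PySem.List.pyRange 0 (PySem.Int.floordiv ((spot + s * (n:Int)) - (spot + (-s) * (m:Int))) s + 1) 1).map
        (fun k => (spot + (-s) * (m:Int)) + s * k)
      = (PySem.List.pyRange (-(m:Int)) ((n:Int) + 1) 1).map (fun k => spot + s * k) := by
  have hdiff : (spot + s * (n:Int)) - (spot + (-s) * (m:Int)) = s * ((n:Int) + (m:Int)) := by ring
  have hfd : PySem.Int.floordiv (s * ((n:Int) + (m:Int))) s = (n:Int) + (m:Int) := by
    simp [PySem.Int.floordiv]
    exact Int.mul_fdiv_cancel_left _ (ne_of_gt hs)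
  rw [hdiff, hfd, PySem.List.pyRange_one, PySem.List.pyRange_one, List.map_map, List.map_map]
  have htn : ((n:Int) + (m:Int) + 1 - 0).toNat = ((n:Int) + 1 - (-(m:Int))).toNat := by omega
  rw [htn]
  apply List.map_congr_left
  intro k _
  simp only [Function.comp]
  ring

-- shared assembly: A's walks on one axis equal B's filter-sort-scan on that axis
lemma pvCaseCore (occupied l : List Int) (spot s : Int) (hs : 0 < s)
    (gu gd : Int → Bool)
    (hgu : ∀ x : Int, gu x = true → (x + s) ∈ occupied)
    (hgd : ∀ x : Int, gd x = true → (x + (-s)) ∈ occupied)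
    (hupT : ∀ n : Nat, (∀ j : Nat, j < n → gu (spot + s * (j:Int)) = true) →
        gu (spot + s * (n:Int)) = false →
        (∀ j : Int, 1 ≤ j → j ≤ (n:Int) → j ∈ l) ∧ ((n:Int)+1) ∉ l)
    (hdnT : ∀ m : Nat, (∀ j : Nat, j < m → gd (spot + (-s) * (j:Int)) = true) →
        gd (spot + (-s) * (m:Int)) = false →
        (∀ j : Int, 1 ≤ j → j ≤ (m:Int) → (-j) ∈ l) ∧ (-(m:Int)-1) ∉ l) :
    PySem.List.sorted (pvAWalk gd (-s) occupied.length spot (pvAWalk gu s occupied.length spot [spot])) (fun x => x)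
      = (match PySem.List.sorted (PySem.Set.add (PySem.Set.ofList l) 0) (fun x : Int => x) with
         | [] => ([] : List Int)
         | v0 :: rest => (PySem.List.pyRange (pvScan rest v0 v0).1 ((pvScan rest v0 v0).2 + 1) 1).map
             (fun k => spot + s * k)) := by
  obtain ⟨n, hn1, hn2, hn3⟩ := pvWalk_full occupied gu s (ne_of_gt hs) hgu spot
  obtain ⟨m, hm1, hm2, hm3⟩ := pvWalk_full occupied gd (-s) (neg_ne_zero.mpr (ne_of_gt hs)) hgd spot
  obtain ⟨hup, hnup⟩ := hupT n hn2 hn3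
  obtain ⟨hdn, hndn⟩ := hdnT m hm2 hm3
  obtain ⟨v0, rest, hcons, hscan⟩ := pvScanRun l n m hup hnup hdn hndn
  rw [pvMaster gu gd s hs occupied.length spot, hn1, hm1, pvRangeMaps spot s hs n m, hcons]
  show List.map (fun k => spot + s * k) (PySem.List.pyRange (-(m:Int)) ((n:Int) + 1) 1)
      = List.map (fun k => spot + s * k) (PySem.List.pyRange (pvScan rest v0 v0).1 ((pvScan rest v0 v0).2 + 1) 1)
  rw [hscan]

-- ===== VERDICT (by name: the statement is the Claim_ definition above) =====
theorem getSideCombo_spec : Claim_equal_getSideCombo := by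
  intro isRowCombo spot occupied _
  unfold Spec_getSideCombo
  cases isRowCombo with
  | true =>
    show getSideCombo true spot occupied = getSideCombo_alt true spot occupied
    have core := pvCaseCore occupied
      ((occupied.filter (fun c => PySem.Int.mod (c - spot) 15 == 0)).map
        (fun c => PySem.Int.floordiv (c - spot) 15))
      spot 15 (by norm_num)
      (fun x => occupied.contains (x + 15)) (fun x => occupied.contains (x - 15))
      (by intro x h; simpa using h)
      (by intro x h; simp only [List.contains_eq_mem, decide_eq_true_eq] at h
          have : x - 15 = x + (-15) := by ring
          rwa [this] at h)
      (by intro n hg hf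
          constructor
          · intro j hj1 hj2
            rw [pvMemRow]
            have := hg (j - 1).toNat (by omega)
            simp only [List.contains_eq_mem, decide_eq_true_eq] at this
            have harg : spot + 15 * (((j-1).toNat : Nat) : Int) + 15 = spot + 15 * j := by
              have hj' : (((j-1).toNat : Nat) : Int) = j - 1 := by omega
              rw [hj']; ring
            rwa [harg] at this
          · rw [pvMemRow]
            simp only [List.contains_eq_mem, decide_eq_false_iff_not] at hf
            intro hmem
            exact hf (by
              have harg : spot + 15 * (n:Int) + 15 = spot + 15 * ((n:Int) + 1) := by ring
              rw [harg]; exact hmem))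
      (by intro m hg hf
          constructor
          · intro j hj1 hj2
            rw [pvMemRow]
            have := hg (j - 1).toNat (by omega)
            simp only [List.contains_eq_mem, decide_eq_true_eq] at this
            have harg : spot + (-15) * (((j-1).toNat : Nat) : Int) - 15 = spot + 15 * (-j) := by
              have hj' : (((j-1).toNat : Nat) : Int) = j - 1 := by omega
              rw [hj']; ring
            rwa [harg] at this
          · rw [pvMemRow]
            simp only [List.contains_eq_mem, decide_eq_false_iff_not] at hf
            intro hmem
            exact hf (by
              have harg : spot + (-15) * (m:Int) - 15 = spot + 15 * (-(m:Int) - 1) := by ring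
              rw [harg]; exact hmem))
    exact core
  | false =>
    show getSideCombo false spot occupied = getSideCombo_alt false spot occupied
    have core := pvCaseCore occupied
      ((occupied.filter (fun c => PySem.Int.floordiv c 15 == PySem.Int.floordiv spot 15)).map
        (fun c => c - spot))
      spot 1 (by norm_num)
      (fun x => occupied.contains (x + 1) && decide (PySem.Int.mod x 15 ≠ 14))
      (fun x => occupied.contains (x - 1) && decide (PySem.Int.mod x 15 ≠ 0))
      (by intro x h
          simp only [Bool.and_eq_true, List.contains_eq_mem, decide_eq_true_eq] at h
          exact h.1)
      (by intro x h
          simp only [Bool.and_eq_true, List.contains_eq_mem, decide_eq_true_eq] at h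
          obtain ⟨h1, h2⟩ := h
          have harg : x - 1 = x + (-1) := by ring
          rwa [harg] at h1)
      (by intro n hg hf
          have hinv : ∀ j : Nat, j ≤ n → (spot + (j:Int)) / 15 = spot / 15 := by
            intro j
            induction j with
            | zero => intro _; simp
            | succ j ih =>
              intro hj
              have ihh := ih (by omega)
              have hgj := hg j (by omega)
              simp only [Bool.and_eq_true, decide_eq_true_eq, pvFm15] at hgj
              have hmod : (spot + 1 * (j:Int)) % 15 ≠ 14 := hgj.2
              push_cast
              omega
          constructor
          · intro j hj1 hj2
            rw [pvMemCol]
            have hgj := hg (j - 1).toNat (by omega)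
            simp only [Bool.and_eq_true, List.contains_eq_mem, decide_eq_true_eq, pvFm15] at hgj
            have hj' : (((j-1).toNat : Nat) : Int) = j - 1 := by omega
            rw [hj'] at hgj
            obtain ⟨hgj1, hgj2⟩ := hgj
            have harg : spot + 1 * (j - 1) + 1 = spot + j := by ring
            rw [harg] at hgj1
            refine ⟨hgj1, ?_⟩
            have hrow := hinv j.toNat (by omega)
            have hjj : ((j.toNat : Nat) : Int) = j := by omega
            rwa [hjj] at hrow
          · rw [pvMemCol]
            rintro ⟨hmem, hrow⟩
            have hinvn := hinv n (le_refl n)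
            have hfail : ¬ ((spot + 1 * (n:Int) + 1) ∈ occupied ∧ (spot + 1 * (n:Int)) % 15 ≠ 14) := by
              intro hc
              have hf' : (occupied.contains ((spot + 1 * (n:Int)) + 1)
                  && decide (PySem.Int.mod (spot + 1 * (n:Int)) 15 ≠ 14)) = false := hf
              have hbeta : (occupied.contains ((spot + 1 * (n:Int)) + 1)
                  && decide (PySem.Int.mod (spot + 1 * (n:Int)) 15 ≠ 14)) = true := by
                simp only [Bool.and_eq_true, List.contains_eq_mem, decide_eq_true_eq, pvFm15]
                exact ⟨hc.1, hc.2⟩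
              rw [hf'] at hbeta
              exact Bool.false_ne_true hbeta
            have h1 : (spot + 1 * (n:Int) + 1) ∈ occupied := by
              have : spot + ((n:Int) + 1) = spot + 1 * (n:Int) + 1 := by ring
              rwa [this] at hmem
            have h2 : (spot + 1 * (n:Int)) % 15 ≠ 14 := by
              have : spot + ((n:Int) + 1) = spot + (n:Int) + 1 := by ring
              rw [this] at hrow
              omega
            exact hfail ⟨h1, h2⟩)
      (by intro m hg hf
          have hinv : ∀ j : Nat, j ≤ m → (spot - (j:Int)) / 15 = spot / 15 := by
            intro j
            induction j with
            | zero => intro _; simp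
            | succ j ih =>
              intro hj
              have ihh := ih (by omega)
              have hgj := hg j (by omega)
              simp only [Bool.and_eq_true, decide_eq_true_eq, pvFm15] at hgj
              have hmod : (spot + (-1) * (j:Int)) % 15 ≠ 0 := hgj.2
              push_cast
              omega
          constructor
          · intro j hj1 hj2
            rw [pvMemCol]
            have hgj := hg (j - 1).toNat (by omega)
            simp only [Bool.and_eq_true, List.contains_eq_mem, decide_eq_true_eq, pvFm15] at hgj
            have hj' : (((j-1).toNat : Nat) : Int) = j - 1 := by omega
            rw [hj'] at hgj
            obtain ⟨hgj1, hgj2⟩ := hgj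
            have harg : spot + (-1) * (j - 1) - 1 = spot + (-j) := by ring
            rw [harg] at hgj1
            refine ⟨hgj1, ?_⟩
            have hrow := hinv j.toNat (by omega)
            have hjj : ((j.toNat : Nat) : Int) = j := by omega
            have harg2 : spot - j = spot + (-j) := by ring
            rw [hjj, harg2] at hrow
            exact hrow
          · rw [pvMemCol]
            rintro ⟨hmem, hrow⟩
            have hinvm := hinv m (le_refl m)
            have hfail : ¬ ((spot + (-1) * (m:Int) - 1) ∈ occupied ∧ (spot + (-1) * (m:Int)) % 15 ≠ 0) := by
              intro hc
              have hf' : (occupied.contains ((spot + (-1) * (m:Int)) - 1)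
                  && decide (PySem.Int.mod (spot + (-1) * (m:Int)) 15 ≠ 0)) = false := hf
              have hbeta : (occupied.contains ((spot + (-1) * (m:Int)) - 1)
                  && decide (PySem.Int.mod (spot + (-1) * (m:Int)) 15 ≠ 0)) = true := by
                simp only [Bool.and_eq_true, List.contains_eq_mem, decide_eq_true_eq, pvFm15]
                exact ⟨hc.1, hc.2⟩
              rw [hf'] at hbeta
              exact Bool.false_ne_true hbeta
            have h1 : (spot + (-1) * (m:Int) - 1) ∈ occupied := by
              have : spot + (-(m:Int) - 1) = spot + (-1) * (m:Int) - 1 := by ring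
              rwa [this] at hmem
            have h2 : (spot + (-1) * (m:Int)) % 15 ≠ 0 := by
              have harg : spot + (-(m:Int) - 1) = spot - (m:Int) - 1 := by ring
              rw [harg] at hrow
              omega
            exact hfail ⟨h1, h2⟩)
    exact core
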